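-- pv_equiv track=rewrite | github.com/jaywon99/connect4 | players/ddqn/player.py | convert_state
-- ===== SOURCE A (Python) =====
-- INPUT_SIZE = 126  # 6 * 7 * 3
--
-- def convert_state(state):
--     ''' convert state from board style to NN style '''
--
--     if INPUT_SIZE == 42:
--         # MAKE 9 / (-1, 0, 1)로 되어있는 board state
--         return state
--
--     if INPUT_SIZE == 84:
--         # [0:8] is my stone occupied
--         # [9:17] is other stone occupied
--         board = [1 if x == 1 else 0 for x in state]
--         board.extend([1 if x == -1 else 0 for x in state])
--         return board
--
--     if INPUT_SIZE == 126:
--         # [0:8] is no stone occupied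
--         # [9:17] is other stone occupied
--         # [18:26] is my stone occupied
--         # in some paper, they are using conv2d
--         board = [1 if x == 0 else 0 for x in state]
--         board.extend([1 if x == 1 else 0 for x in state])
--         board.extend([1 if x == -1 else 0 for x in state])
--         return board
--
--     raise Exception
-- ===== SOURCE B (Python) =====
-- INPUT_SIZE = 126  # 6 * 7 * 3
--
-- def convert_state(state):
--     ''' convert state from board style to NN style: scatter into a preallocated one-hot buffer '''
--     n = len(state)
--     result = [0] * (3 * n)
--     block = {0: 0, 1: 1, -1: 2}
--     for i, x in enumerate(state):
--         b = block.get(x)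
--         if b is not None:
--             result[b * n + i] = 1
--     return result
-- ===== Notes on version B (the rewrite author's own statement) =====
-- stated objective: alternative
-- what changed: Instead of building and concatenating three indicator lists, B preallocates a zero buffer of length 3n and makes one scatter pass that writes a single 1 per cell at block*n+i, the block chosen by a value-to-block dict lookup.
import Mathlib
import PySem

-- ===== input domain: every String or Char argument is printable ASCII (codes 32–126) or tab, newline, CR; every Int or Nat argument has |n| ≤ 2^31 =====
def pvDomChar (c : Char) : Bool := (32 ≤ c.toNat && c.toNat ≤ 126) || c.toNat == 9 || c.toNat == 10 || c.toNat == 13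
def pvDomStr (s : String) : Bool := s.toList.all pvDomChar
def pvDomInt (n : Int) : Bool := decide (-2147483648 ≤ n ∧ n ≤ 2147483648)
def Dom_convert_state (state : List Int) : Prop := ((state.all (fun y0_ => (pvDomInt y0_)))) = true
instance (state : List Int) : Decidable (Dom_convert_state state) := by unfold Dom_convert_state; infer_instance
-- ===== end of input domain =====

-- B replaces A's three gather comprehensions with one scatter pass into a preallocated
-- zero buffer of length 3n, writing a 1 at block*n+i via a value→block dict (alternative, same cost).

-- ===== PORT A =====
def INPUT_SIZE : Int := 126  -- 6 * 7 * 3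

def convert_state (state : List Int) : List Int :=
  if INPUT_SIZE = 42 then state
  else if INPUT_SIZE = 84 then
    (state.map (fun x => if x = 1 then (1 : Int) else 0)) ++
      (state.map (fun x => if x = -1 then (1 : Int) else 0))
  else if INPUT_SIZE = 126 then
    (state.map (fun x => if x = 0 then (1 : Int) else 0)) ++
      (state.map (fun x => if x = 1 then (1 : Int) else 0)) ++
        (state.map (fun x => if x = -1 then (1 : Int) else 0))
  else []  -- Python's 'raise Exception'; unreachable since INPUT_SIZE = 126

-- ===== PORT B =====
def convert_state_alt (state : List Int) : List Int :=
  let n : Nat := state.length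
  let block : PySem.Dict Int Int := PySem.Dict.ofList [(0, 0), (1, 1), (-1, 2)]
  (PySem.List.enumerate state 0).foldl
    (fun acc p =>
      match block.get? p.2 with
      | some b => PySem.List.pySetD acc (b * (n : Int) + p.1) 1
      | none => acc)
    (List.replicate (3 * n) (0 : Int))

-- ===== PRECONDITION & SPEC =====
def Spec_convert_state (state : List Int) (out : List Int) : Prop := out = convert_state_alt state
instance (state : List Int) (out : List Int) : Decidable (Spec_convert_state state out) := by unfold Spec_convert_state; infer_instance

-- ===== CLAIM (what is proved, stated in full; the proofs are below) =====
def Claim_equal_convert_state : Prop := ∀ (state : List Int), Dom_convert_state state → Spec_convert_state state (convert_state state)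

-- ===== LEMMAS AND PROOFS =====

-- the per-block one-hot fold: setting position i to 1 exactly when xs[i] = c
def blockFold (c : Int) (xs : List Int) (s : Int) (l : List Int) : List Int :=
  (PySem.List.enumerate xs s).foldl
    (fun l p => if p.2 = c then l.set p.1.toNat 1 else l) l

theorem blockFold_spec (c : Int) :
    ∀ (xs : List Int) (p : List Int),
      blockFold c xs (p.length : Int) (p ++ List.replicate xs.length 0)
        = p ++ xs.map (fun x => if x = c then (1 : Int) else 0) := by
  intro xs
  induction xs with
  | nil => intro p; simp [blockFold, PySem.List.enumerate]
  | cons y ys ih =>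
    intro p
    simp only [blockFold, PySem.List.enumerate_cons, List.foldl_cons, List.length_cons,
      List.replicate_succ, List.map_cons]
    have hset : ∀ v : Int, (p ++ v :: List.replicate ys.length 0).set p.length 1
        = p ++ 1 :: List.replicate ys.length 0 := by
      intro v
      rw [List.set_append_right _ _ (le_refl _)]
      simp
    by_cases hy : y = c
    · simp only [hy, Int.toNat_natCast, hset]
      have := ih (p ++ [1])
      simpa [blockFold, List.append_assoc] using this
    · simp only [if_neg hy]
      have := ih (p ++ [0])
      simpa [blockFold, List.append_assoc] using this

-- the three-block scatter fold splits into three independent per-block folds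
theorem scatter_split (n : Nat) :
    ∀ (xs : List Int) (s : Nat) (e m t : List Int),
      e.length = n → m.length = n → t.length = n → s + xs.length ≤ n →
      (PySem.List.enumerate xs (s : Int)).foldl
        (fun acc p =>
          match (PySem.Dict.ofList [((0:Int), (0:Int)), (1, 1), (-1, 2)]).get? p.2 with
          | some b => PySem.List.pySetD acc (b * (n : Int) + p.1) 1
          | none => acc)
        (e ++ m ++ t)
      = blockFold 0 xs (s : Int) e ++ blockFold 1 xs (s : Int) m ++ blockFold (-1) xs (s : Int) t := by
  intro xs
  induction xs with
  | nil => intro s e m t he hm ht hs; simp [blockFold, PySem.List.enumerate]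
  | cons y ys ih =>
    intro s e m t he hm ht hs
    simp only [List.length_cons] at hs
    have hsn : s < n := by omega
    simp only [PySem.List.enumerate_cons, List.foldl_cons, blockFold]
    rcases Decidable.em (y = 0) with h0 | h0
    · -- write into block e at index s
      subst h0
      have hv : (PySem.Dict.ofList [((0:Int), (0:Int)), (1, 1), (-1, 2)]).get? 0 = some 0 := by decide
      simp only [hv]
      have hidx : (0 : Int) * (n : Int) + (s : Int) = ((s : Nat) : Int) := by ring
      rw [hidx, PySem.List.pySetD_natCast, List.append_assoc,
        List.set_append_left _ _ (by omega : s < e.length), ← List.append_assoc]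
      have key := ih (s + 1) (e.set s 1) m t (by simpa using he) hm ht (by omega)
      push_cast at key ⊢
      rw [key]
      simp [blockFold]
    · rcases Decidable.em (y = 1) with h1 | h1
      · -- write into block m at index s
        subst h1
        have hv : (PySem.Dict.ofList [((0:Int), (0:Int)), (1, 1), (-1, 2)]).get? 1 = some 1 := by decide
        simp only [hv]
        have hidx : (1 : Int) * (n : Int) + (s : Int) = ((n + s : Nat) : Int) := by push_cast; ring
        rw [hidx, PySem.List.pySetD_natCast, List.append_assoc,
          List.set_append_right _ _ (by omega : e.length ≤ n + s)]
        have hsub : n + s - e.length = s := by omega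
        rw [hsub, List.set_append_left _ _ (by omega : s < m.length), ← List.append_assoc]
        have key := ih (s + 1) e (m.set s 1) t he (by simpa using hm) ht (by omega)
        push_cast at key ⊢
        rw [key]
        simp [blockFold]
      · rcases Decidable.em (y = -1) with h2 | h2
        · -- write into block t at index s
          subst h2
          have hv : (PySem.Dict.ofList [((0:Int), (0:Int)), (1, 1), (-1, 2)]).get? (-1) = some 2 := by decide
          simp only [hv]
          have hidx : (2 : Int) * (n : Int) + (s : Int) = ((n + n + s : Nat) : Int) := by push_cast; ring
          rw [hidx, PySem.List.pySetD_natCast, List.append_assoc,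
            List.set_append_right _ _ (by omega : e.length ≤ n + n + s)]
          have hsub : n + n + s - e.length = n + s := by omega
          rw [hsub, List.set_append_right _ _ (by omega : m.length ≤ n + s)]
          have hsub2 : n + s - m.length = s := by omega
          rw [hsub2, ← List.append_assoc]
          have key := ih (s + 1) e m (t.set s 1) he hm (by simpa using ht) (by omega)
          push_cast at key ⊢
          rw [key]
          simp [blockFold]
        · -- value outside {0,1,-1}: no write
          have hv : (PySem.Dict.ofList [((0:Int), (0:Int)), (1, 1), (-1, 2)]).get? y = none := by
            have hd : (PySem.Dict.ofList [((0:Int), (0:Int)), (1, 1), (-1, 2)])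
                = PySem.Dict.mk [(0, 0), (1, 1), (-1, 2)] := by decide
            rw [hd]
            simp only [PySem.Dict.get?_mk_cons]
            rw [if_neg (by simpa [beq_iff_eq] using fun h => h0 h.symm),
              if_neg (by simpa [beq_iff_eq] using fun h => h1 h.symm),
              if_neg (by simpa [beq_iff_eq] using fun h => h2 h.symm)]
            rfl
          simp only [hv]
          have key := ih (s + 1) e m t he hm ht (by omega)
          push_cast at key ⊢
          rw [key]
          simp [blockFold, h0, h1, h2]

-- ===== VERDICT (by name: the statement is the Claim_ definition above) =====
theorem convert_state_spec : Claim_equal_convert_state := by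
  intro state _
  unfold Spec_convert_state convert_state convert_state_alt INPUT_SIZE
  rw [if_neg (by decide), if_neg (by decide), if_pos rfl]
  dsimp only
  have hrep : List.replicate (3 * state.length) (0 : Int)
      = List.replicate state.length 0 ++ List.replicate state.length 0 ++ List.replicate state.length 0 := by
    rw [← List.replicate_add, ← List.replicate_add]; ring_nf
  rw [hrep]
  have := scatter_split state.length state 0
    (List.replicate state.length 0) (List.replicate state.length 0) (List.replicate state.length 0)
    (by simp) (by simp) (by simp) (by omega)
  simp only [Nat.cast_zero] at this
  rw [this]
  have hb0 := blockFold_spec 0 state []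
  have hb1 := blockFold_spec 1 state []
  have hb2 := blockFold_spec (-1) state []
  simp only [List.length_nil, List.nil_append, Nat.cast_zero] at hb0 hb1 hb2
  rw [hb0, hb1, hb2]
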